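-- pv_equiv track=rewrite | github.com/ss2576/Tetrika | task3/calculation.py | check_uniq
-- ===== SOURCE A (Python) =====
-- def check_uniq(check_pair):
--     """вычесление отрезка временипроверка пар на нахождение
--        одновременного присутствия на уроке"""
--     unic_pair = []
--
--     def check(check_pair):
--         pair = []
--         time_start = check_pair[0][0]
--         time_end = check_pair[0][1]
--         for i in check_pair[1:]:
--             if (i[0] < time_start) & (i[1] > time_start):
--                 time_start = i[0]
--             elif (i[1] > time_end) & (i[0] < time_end):
--                 time_end = i[1]
--             elif (i[0] > time_end) or (i[1] < time_start):
--                 if i not in pair: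
--                     pair.append(i)
--         if [time_start, time_end] not in unic_pair:
--             unic_pair.append([time_start, time_end])
--         if len(pair) > 0:
--             check(pair)
--
--         return unic_pair
--
--     return check(check_pair)
-- ===== SOURCE B (Python) =====
-- def _dedup(xs):
--     out = []
--     for x in xs:
--         if x not in out:
--             out.append(x)
--     return out
--
--
-- def check_uniq(check_pair):
--     """Iterative worklist version: collect each round's raw leftovers and the
--     round results, deduplicating in separate passes instead of interleaved
--     membership checks inside a recursive closure."""
--     rounds = []
--     current = check_pair
--     while current:
--         time_start = current[0][0]
--         time_end = current[0][1]
--         leftovers = []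
--         for i in current[1:]:
--             if i[0] < time_start and i[1] > time_start:
--                 time_start = i[0]
--             elif i[1] > time_end and i[0] < time_end:
--                 time_end = i[1]
--             elif i[0] > time_end or i[1] < time_start:
--                 leftovers.append(i)
--         rounds.append([time_start, time_end])
--         current = _dedup(leftovers)
--     return _dedup(rounds)
-- ===== Notes on version B (the rewrite author's own statement) =====
-- stated objective: alternative
-- what changed: Replaces the recursive inner closure that mutates a shared unic_pair list with interleaved 'not in' dedup checks by an iterative worklist loop that collects raw leftovers and round results and deduplicates each in a separate first-occurrence pass.
import Mathlib
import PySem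

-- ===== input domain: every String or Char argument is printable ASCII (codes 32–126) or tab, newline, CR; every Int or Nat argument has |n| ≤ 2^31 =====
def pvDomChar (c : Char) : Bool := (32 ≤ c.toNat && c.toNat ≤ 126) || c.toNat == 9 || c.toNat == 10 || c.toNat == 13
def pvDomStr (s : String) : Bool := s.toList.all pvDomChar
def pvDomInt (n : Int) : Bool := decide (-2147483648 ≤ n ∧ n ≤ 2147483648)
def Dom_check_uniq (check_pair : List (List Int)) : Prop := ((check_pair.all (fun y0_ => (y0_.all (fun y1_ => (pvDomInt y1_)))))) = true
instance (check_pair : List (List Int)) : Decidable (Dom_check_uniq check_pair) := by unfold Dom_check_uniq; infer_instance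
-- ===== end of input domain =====

-- B replaces A's recursive closure (interleaved `not in` dedup of a shared list) by an
-- iterative worklist loop collecting raw leftovers/round results and deduplicating in
-- separate passes; objective: alternative decomposition, same cost.

-- ===== PORT A =====
-- i[0] / i[1]: exact Python indexing when the inner list has length ≥ 2 (guaranteed by Pre_)
def pvGetI (l : List Int) (k : Int) : Int := (PySem.List.pyGet? l k).getD 0

-- the for-loop of A's inner `check`: state (time_start, time_end, pair), dedup interleaved
def scanA : List (List Int) → Int → Int → List (List Int) → Int × Int × List (List Int)
  | [], ts, te, pair => (ts, te, pair)
  | i :: rest, ts, te, pair =>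
    if pvGetI i 0 < ts ∧ pvGetI i 1 > ts then scanA rest (pvGetI i 0) te pair
    else if pvGetI i 1 > te ∧ pvGetI i 0 < te then scanA rest ts (pvGetI i 1) pair
    else if pvGetI i 0 > te ∨ pvGetI i 1 < ts then
      (if i ∈ pair then scanA rest ts te pair else scanA rest ts te (pair ++ [i]))
    else scanA rest ts te pair

-- termination measure for checkA: the pair grows by at most one element per scanned item
theorem scanA_len : ∀ (l : List (List Int)) (ts te : Int) (p : List (List Int)),
    (scanA l ts te p).2.2.length ≤ p.length + l.length := by
  intro l
  induction l with
  | nil => intro ts te p; simp [scanA]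
  | cons i rest ih =>
    intro ts te p
    simp only [scanA]
    split_ifs with h1 h2 h3 h4 <;>
      first
        | (have := ih (pvGetI i 0) te p; simp at *; omega)
        | (have := ih ts (pvGetI i 1) p; simp at *; omega)
        | (have := ih ts te p; simp at *; omega)
        | (have := ih ts te (p ++ [i]); simp at *; omega)

-- A's recursive `check` with the shared accumulator `unic_pair` made explicit
def checkA (current unic : List (List Int)) : List (List Int) :=
  match current with
  | [] => unic  -- unreachable under Pre_: Python raises IndexError on check_pair[0]
  | c :: rest =>
    let r := scanA rest (pvGetI c 0) (pvGetI c 1) []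
    let unic' := if [r.1, r.2.1] ∈ unic then unic else unic ++ [[r.1, r.2.1]]
    if r.2.2.length > 0 then checkA r.2.2 unic' else unic'
termination_by current.length
decreasing_by
  have := scanA_len rest (pvGetI c 0) (pvGetI c 1) []
  simp at *; omega

def check_uniq (check_pair : List (List Int)) : List (List Int) := checkA check_pair []

-- ===== PORT B =====
-- B's _dedup helper: first-occurrence dedup in one separate pass
def dedupStep (a : List (List Int)) (x : List Int) : List (List Int) :=
  if x ∈ a then a else a ++ [x]

def dedupB (xs : List (List Int)) : List (List Int) := xs.foldl dedupStep []

-- B's inner for-loop: collects raw leftovers (duplicates kept)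
def scanB : List (List Int) → Int → Int → List (List Int) → Int × Int × List (List Int)
  | [], ts, te, left => (ts, te, left)
  | i :: rest, ts, te, left =>
    if pvGetI i 0 < ts ∧ pvGetI i 1 > ts then scanB rest (pvGetI i 0) te left
    else if pvGetI i 1 > te ∧ pvGetI i 0 < te then scanB rest ts (pvGetI i 1) left
    else if pvGetI i 0 > te ∨ pvGetI i 1 < ts then scanB rest ts te (left ++ [i])
    else scanB rest ts te left

-- termination measures for loopB
theorem scanB_len : ∀ (l : List (List Int)) (ts te : Int) (q : List (List Int)),
    (scanB l ts te q).2.2.length ≤ q.length + l.length := by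
  intro l
  induction l with
  | nil => intro ts te q; simp [scanB]
  | cons i rest ih =>
    intro ts te q
    simp only [scanB]
    split_ifs with h1 h2 h3 <;>
      first
        | (have := ih (pvGetI i 0) te q; simp at *; omega)
        | (have := ih ts (pvGetI i 1) q; simp at *; omega)
        | (have := ih ts te (q ++ [i]); simp at *; omega)
        | (have := ih ts te q; simp at *; omega)

theorem dedupB_foldl_len : ∀ (xs a : List (List Int)),
    (xs.foldl dedupStep a).length ≤ a.length + xs.length := by
  intro xs
  induction xs with
  | nil => intro a; simp
  | cons x rest ih =>
    intro a
    rw [List.foldl_cons]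
    have h1 := ih (dedupStep a x)
    have h2 : (dedupStep a x).length ≤ a.length + 1 := by
      unfold dedupStep; split_ifs <;> simp
    simp only [List.length_cons]
    omega

theorem dedupB_len (xs : List (List Int)) : (dedupB xs).length ≤ xs.length := by
  have := dedupB_foldl_len xs []
  simpa [dedupB] using this

-- B's `while current:` loop, threading the worklist and the raw rounds list
def loopB (current rounds : List (List Int)) : List (List Int) :=
  match current with
  | [] => rounds
  | c :: rest =>
    let r := scanB rest (pvGetI c 0) (pvGetI c 1) []
    loopB (dedupB r.2.2) (rounds ++ [[r.1, r.2.1]])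
termination_by current.length
decreasing_by
  have h1 := dedupB_len (scanB rest (pvGetI c 0) (pvGetI c 1) []).2.2
  have h2 := scanB_len rest (pvGetI c 0) (pvGetI c 1) []
  simp at *; omega

def check_uniq_alt (check_pair : List (List Int)) : List (List Int) :=
  dedupB (loopB check_pair [])

-- ===== PRECONDITION & SPEC =====
-- Pre_ excludes exactly the inputs where Python A raises IndexError: an empty outer list
-- (check_pair[0]) or an inner list without both endpoints (i[0]/i[1]).
def Pre_check_uniq (check_pair : List (List Int)) : Prop :=
  check_pair ≠ [] ∧ ∀ l ∈ check_pair, 2 ≤ l.length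
instance (check_pair : List (List Int)) : Decidable (Pre_check_uniq check_pair) := by
  unfold Pre_check_uniq; infer_instance

def pvWitness_check_uniq : List (List Int) := [[1, 5], [2, 6], [9, 11]]

def Spec_check_uniq (check_pair : List (List Int)) (out : List (List Int)) : Prop := out = check_uniq_alt check_pair
instance (check_pair : List (List Int)) (out : List (List Int)) : Decidable (Spec_check_uniq check_pair out) := by unfold Spec_check_uniq; infer_instance

-- ===== CLAIM (what is proved, stated in full; the proofs are below) =====
def Claim_equal_check_uniq : Prop := ∀ (check_pair : List (List Int)), Dom_check_uniq check_pair → Pre_check_uniq check_pair → Spec_check_uniq check_pair (check_uniq check_pair)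

-- ===== LEMMAS AND PROOFS =====

-- scanB's leftover accumulator is just prepended output
theorem scanB_acc : ∀ (l : List (List Int)) (ts te : Int) (q : List (List Int)),
    scanB l ts te q =
      ((scanB l ts te []).1, (scanB l ts te []).2.1, q ++ (scanB l ts te []).2.2) := by
  intro l
  induction l with
  | nil => intro ts te q; simp [scanB]
  | cons i rest ih =>
    intro ts te q
    simp only [scanB]
    split_ifs with h1 h2 h3
    · exact ih (pvGetI i 0) te q
    · exact ih ts (pvGetI i 1) q
    · rw [ih ts te (q ++ [i]), ih ts te ([] ++ [i])]
      simp
    · exact ih ts te q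

-- A's interleaved dedup equals B's raw collection followed by a dedup fold
theorem scan_rel : ∀ (l : List (List Int)) (ts te : Int) (p : List (List Int)),
    scanA l ts te p =
      ((scanB l ts te []).1, (scanB l ts te []).2.1,
        (scanB l ts te []).2.2.foldl dedupStep p) := by
  intro l
  induction l with
  | nil => intro ts te p; simp [scanA, scanB]
  | cons i rest ih =>
    intro ts te p
    simp only [scanA, scanB]
    split_ifs with h1 h2 h3 hm
    · exact ih (pvGetI i 0) te p
    · exact ih ts (pvGetI i 1) p
    · simp only [scanB_acc rest ts te ([] ++ [i])]
      simpa [dedupStep, hm] using ih ts te p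
    · simp only [scanB_acc rest ts te ([] ++ [i])]
      simpa [dedupStep, hm] using ih ts te (p ++ [i])
    · exact ih ts te p

theorem dedupB_append_one (xs : List (List Int)) (x : List Int) :
    dedupB (xs ++ [x]) = dedupStep (dedupB xs) x := by
  simp [dedupB, List.foldl_append]

theorem checkA_cons (c : List Int) (rest unic : List (List Int)) :
    checkA (c :: rest) unic =
      (let r := scanA rest (pvGetI c 0) (pvGetI c 1) []
       let unic' := if [r.1, r.2.1] ∈ unic then unic else unic ++ [[r.1, r.2.1]]
       if r.2.2.length > 0 then checkA r.2.2 unic' else unic') := by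
  rw [checkA]

theorem loopB_cons (c : List Int) (rest rounds : List (List Int)) :
    loopB (c :: rest) rounds =
      (let r := scanB rest (pvGetI c 0) (pvGetI c 1) []
       loopB (dedupB r.2.2) (rounds ++ [[r.1, r.2.1]])) := by
  rw [loopB]

theorem main_rel : ∀ (n : Nat) (current rounds : List (List Int)), current.length ≤ n →
    checkA current (dedupB rounds) = dedupB (loopB current rounds) := by
  intro n
  induction n with
  | zero =>
    intro cur rounds h
    have hcur : cur = [] := by
      cases cur with
      | nil => rfl
      | cons a b => simp at h
    subst hcur
    simp [checkA, loopB]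
  | succ n ih =>
    intro cur rounds h
    cases cur with
    | nil => simp [checkA, loopB]
    | cons c rest =>
      rw [checkA_cons, loopB_cons]
      simp only [scan_rel rest (pvGetI c 0) (pvGetI c 1) []]
      set s := scanB rest (pvGetI c 0) (pvGetI c 1) [] with hs
      have hdd : s.2.2.foldl dedupStep [] = dedupB s.2.2 := rfl
      have hu : (if [s.1, s.2.1] ∈ dedupB rounds then dedupB rounds
                  else dedupB rounds ++ [[s.1, s.2.1]]) = dedupB (rounds ++ [[s.1, s.2.1]]) := by
        rw [dedupB_append_one]
        simp [dedupStep]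
      simp only [hdd, hu]
      by_cases hlen : (dedupB s.2.2).length > 0
      · rw [if_pos hlen]
        apply ih
        have h1 := dedupB_len s.2.2
        have h2 := scanB_len rest (pvGetI c 0) (pvGetI c 1) []
        rw [← hs] at h2
        simp at h h2
        omega
      · rw [if_neg hlen]
        have : dedupB s.2.2 = [] := by
          cases hd : dedupB s.2.2 with
          | nil => rfl
          | cons a b => rw [hd] at hlen; simp at hlen
        rw [this]
        simp [loopB]

-- ===== VERDICT (by name: the statement is the Claim_ definition above) =====
theorem check_uniq_spec : Claim_equal_check_uniq := by
  intro cp _ _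
  unfold Spec_check_uniq check_uniq check_uniq_alt
  have := main_rel cp.length cp [] le_rfl
  simpa [dedupB] using this
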